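-- pv_equiv track=rewrite | github.com/DoubleEagle/aoc2021 | day12/day12.py | can_visit
-- ===== SOURCE A (Python) =====
-- def can_visit(to_visit, visited):
--     found_more_than_once_visited = False
--     # large caves may be visited always
--     if to_visit.isupper():
--         return True
--     # if a cave is visited 2 or more times or no times at all, definitely not visiting that one
--     if visited.count(to_visit) > 1:
--         return False
--     if visited.count(to_visit) == 0:
--         return True
--
--     # find out if there is cave visited multiple times
--     # because of previous clause it will not count itself
--     for cave in set(visited):
--         if cave.islower():
--             if visited.count(cave) > 1:
--                 return False
--     return True
-- ===== SOURCE B (Python) =====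
-- def can_visit(to_visit, visited):
--     # large caves may always be visited
--     if to_visit.isupper():
--         return True
--     # never visited yet: fine
--     if to_visit not in visited:
--         return True
--     # single pass: fail as soon as some relevant cave (to_visit itself, or any
--     # lowercase cave) is seen a second time
--     seen = set()
--     for cave in visited:
--         if cave == to_visit or cave.islower():
--             if cave in seen:
--                 return False
--             seen.add(cave)
--     return True
-- ===== Notes on version B (the rewrite author's own statement) =====
-- stated objective: simpler
-- what changed: Replaces A's two visited.count(to_visit) scans plus the for-cave-in-set(visited) re-count loop (each re-scanning the whole list) by a membership test and one single pass over visited with a 'seen' set that fails as soon as to_visit or any lowercase cave is seen twice.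
import Mathlib
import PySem

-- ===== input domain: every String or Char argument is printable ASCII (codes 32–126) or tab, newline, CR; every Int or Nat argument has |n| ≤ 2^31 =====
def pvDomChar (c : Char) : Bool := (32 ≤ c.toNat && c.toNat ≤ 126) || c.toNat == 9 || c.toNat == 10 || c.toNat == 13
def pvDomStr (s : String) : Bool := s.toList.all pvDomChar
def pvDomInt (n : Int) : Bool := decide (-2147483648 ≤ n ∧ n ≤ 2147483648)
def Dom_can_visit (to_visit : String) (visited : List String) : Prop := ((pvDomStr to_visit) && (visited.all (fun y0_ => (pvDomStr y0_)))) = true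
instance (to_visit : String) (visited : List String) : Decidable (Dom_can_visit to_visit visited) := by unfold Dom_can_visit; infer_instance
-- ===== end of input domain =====

-- B replaces A's repeated list.count scans and set-recount loop by a membership test
-- plus one seen-set pass; objective: simpler.


-- ===== PORT A =====
-- s.isupper() on ASCII: at least one cased (alphabetic) char and no lowercase char
def pyStrIsupper (s : String) : Bool :=
  s.toList.any (fun c => PySem.Chars.isalpha c) && s.toList.all (fun c => !(PySem.Chars.islower c))

-- s.islower() on ASCII: at least one cased (alphabetic) char and no uppercase char
def pyStrIslower (s : String) : Bool :=
  s.toList.any (fun c => PySem.Chars.isalpha c) && s.toList.all (fun c => !(PySem.Chars.isupper c))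

-- the 'for cave in set(visited)' loop of A (value is independent of the iteration order)
def canVisitLoopA (visited : List String) : List String → Bool
  | [] => true
  | cave :: rest =>
    if pyStrIslower cave then
      if PySem.List.count visited cave > 1 then false
      else canVisitLoopA visited rest
    else canVisitLoopA visited rest

def can_visit (to_visit : String) (visited : List String) : Bool :=
  if pyStrIsupper to_visit then true
  else if PySem.List.count visited to_visit > 1 then false
  else if PySem.List.count visited to_visit == 0 then true
  else canVisitLoopA visited (PySem.Set.ofList visited)

-- ===== PORT B =====
-- B's single pass with a 'seen' set, early-false on a repeated relevant cave
def canVisitLoopB (to_visit : String) : List String → PySem.Set String → Bool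
  | [], _ => true
  | cave :: rest, seen =>
    if cave == to_visit || pyStrIslower cave then
      if PySem.Set.contains seen cave then false
      else canVisitLoopB to_visit rest (PySem.Set.add seen cave)
    else canVisitLoopB to_visit rest seen

def can_visit_alt (to_visit : String) (visited : List String) : Bool :=
  if pyStrIsupper to_visit then true
  else if !(visited.contains to_visit) then true
  else canVisitLoopB to_visit visited PySem.Set.empty

-- ===== PRECONDITION & SPEC =====
def Spec_can_visit (to_visit : String) (visited : List String) (out : Bool) : Prop := out = can_visit_alt to_visit visited
instance (to_visit : String) (visited : List String) (out : Bool) : Decidable (Spec_can_visit to_visit visited out) := by unfold Spec_can_visit; infer_instance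

-- ===== CLAIM (what is proved, stated in full; the proofs are below) =====
def Claim_equal_can_visit : Prop := ∀ (to_visit : String) (visited : List String), Dom_can_visit to_visit visited → Spec_can_visit to_visit visited (can_visit to_visit visited)

-- ===== LEMMAS AND PROOFS =====

-- a cave is "tracked" by B's pass iff it is to_visit itself or lowercase
def trackedCave (to_visit cave : String) : Bool := cave == to_visit || pyStrIslower cave

theorem loopA_true_iff (visited : List String) (l : List String) :
    canVisitLoopA visited l = true ↔ ∀ c ∈ l, pyStrIslower c = true → PySem.List.count visited c ≤ 1 := by
  induction l with
  | nil => simp [canVisitLoopA]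
  | cons cave rest ih =>
    simp only [canVisitLoopA, List.mem_cons]
    by_cases hl : pyStrIslower cave = true
    · by_cases hc : PySem.List.count visited cave > 1
      · rw [PySem.List.count_eq] at hc
        simp [hl]
        intro h
        omega
      · simp [hl, ih]
    · simp [hl, ih]

theorem loopB_true_iff (to_visit : String) (l : List String) (seen : PySem.Set String) :
    canVisitLoopB to_visit l seen = true ↔
      ((l.filter (trackedCave to_visit)).Nodup ∧ ∀ c ∈ l, trackedCave to_visit c = true → c ∉ seen) := by
  induction l generalizing seen with
  | nil => simp [canVisitLoopB]
  | cons cave rest ih =>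
    simp only [canVisitLoopB, List.mem_cons, List.filter_cons, trackedCave]
    by_cases ht : (cave == to_visit || pyStrIslower cave) = true
    · by_cases hs : cave ∈ seen
      · have hc : PySem.Set.contains seen cave = true := (PySem.Set.contains_iff seen cave).mpr hs
        simp only [ht, hc, if_true]
        constructor
        · intro h; exact absurd h (by simp)
        · rintro ⟨-, h2⟩; exact absurd hs (h2 cave (Or.inl rfl) ht)
      · have hc : PySem.Set.contains seen cave = false := by
          cases h : PySem.Set.contains seen cave
          · rfl
          · exact absurd ((PySem.Set.contains_iff seen cave).mp h) hs
        simp only [ht, hc, if_true, Bool.false_eq_true, if_false, ih, List.nodup_cons]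
        constructor
        · rintro ⟨h1, h2⟩
          refine ⟨⟨?_, h1⟩, ?_⟩
          · intro hmem
            have hm := List.mem_filter.mp hmem
            exact (h2 cave hm.1 hm.2) ((PySem.Set.mem_add seen cave cave).mpr (Or.inr rfl))
          · rintro c (rfl | hcm) htc
            · exact hs
            · intro hcs
              exact (h2 c hcm htc) ((PySem.Set.mem_add seen cave c).mpr (Or.inl hcs))
        · rintro ⟨⟨hnf, h1⟩, h2⟩
          refine ⟨h1, ?_⟩
          intro c hcm htc hcs
          rcases (PySem.Set.mem_add seen cave c).mp hcs with hcs' | rfl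
          · exact (h2 c (Or.inr hcm) htc) hcs'
          · exact hnf (List.mem_filter.mpr ⟨hcm, htc⟩)
    · simp only [ht, Bool.false_eq_true, if_false, ih]
      constructor
      · rintro ⟨h1, h2⟩
        refine ⟨h1, ?_⟩
        rintro c (rfl | hcm) htc
        · exact absurd htc ht
        · exact h2 c hcm htc
      · rintro ⟨h1, h2⟩
        exact ⟨h1, fun c hcm htc => h2 c (Or.inr hcm) htc⟩

theorem nodup_filter_tracked_iff (tv : String) (visited : List String) :
    (visited.filter (trackedCave tv)).Nodup
      ↔ ∀ c ∈ visited, trackedCave tv c = true → visited.count c ≤ 1 := by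
  rw [List.nodup_iff_count_le_one]
  constructor
  · intro h c hcm htc
    have hc := h c
    rwa [List.count_filter htc] at hc
  · intro h c
    by_cases htc : trackedCave tv c = true
    · rw [List.count_filter htc]
      by_cases hcm : c ∈ visited
      · exact h c hcm htc
      · simp [List.count_eq_zero_of_not_mem hcm]
    · have hnm : c ∉ visited.filter (trackedCave tv) := by
        intro hmem
        exact htc (List.mem_filter.mp hmem).2
      simp [List.count_eq_zero_of_not_mem hnm]

-- ===== VERDICT (by name: the statement is the Claim_ definition above) =====
theorem can_visit_spec : Claim_equal_can_visit := by
  unfold Claim_equal_can_visit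
  intro tv visited _
  unfold Spec_can_visit can_visit can_visit_alt
  by_cases hu : pyStrIsupper tv = true
  · simp [hu]
  · simp only [hu, Bool.false_eq_true, if_false]
    rw [PySem.List.count_eq]
    by_cases h0 : visited.count tv = 0
    · have hmem : tv ∉ visited := by rwa [← List.count_eq_zero]
      simp [h0, hmem]
    · have hmem : tv ∈ visited := by
        rw [← List.count_pos_iff]; omega
      have hcon : visited.contains tv = true := by simpa using hmem
      simp only [hcon, Bool.not_true, Bool.false_eq_true, if_false]
      by_cases h2 : visited.count tv > 1
      · simp only [h2, if_true]
        have hB : ¬ (canVisitLoopB tv visited PySem.Set.empty = true) := by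
          rw [loopB_true_iff]
          rintro ⟨hnd, -⟩
          have htv : trackedCave tv tv = true := by simp [trackedCave]
          have hcnt := (List.nodup_iff_count_le_one.mp hnd) tv
          rw [List.count_filter htv] at hcnt
          omega
        cases hb : canVisitLoopB tv visited PySem.Set.empty
        · rfl
        · exact absurd hb hB
      · have h1 : visited.count tv = 1 := by omega
        have hne : (visited.count tv == 0) = false := by simp [h1]
        simp only [h2, if_false, hne, Bool.false_eq_true]
        rw [Bool.eq_iff_iff, loopA_true_iff, loopB_true_iff]
        simp only [PySem.Set.mem_ofList, PySem.List.count_eq, PySem.Set.empty,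
          List.not_mem_nil, not_false_iff, implies_true, and_true]
        rw [nodup_filter_tracked_iff]
        constructor
        · intro h c hcm htc
          have htc' : c = tv ∨ pyStrIslower c = true := by simpa [trackedCave] using htc
          rcases htc' with rfl | hlc
          · omega
          · exact h c hcm hlc
        · intro h c hcm hlc
          exact h c hcm (by simp [trackedCave, hlc])
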